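-- pv_equiv track=rewrite | github.com/andrewhawkins13/CLIforAPI | src/cliforapi/matcher.py | _fuzzy_path_equal
-- ===== SOURCE A (Python) =====
-- def _levenshtein(a: str, b: str) -> int:
--     if len(a) < len(b):
--         return _levenshtein(b, a)
--     if not b:
--         return len(a)
--     prev = list(range(len(b) + 1))
--     for i, ca in enumerate(a):
--         curr = [i + 1]
--         for j, cb in enumerate(b):
--             cost = 0 if ca == cb else 1
--             curr.append(min(curr[j] + 1, prev[j + 1] + 1, prev[j] + cost))
--         prev = curr
--     return prev[-1]
--
-- def _singularize(word: str) -> str: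
--     if word.endswith("ies"):
--         return word[:-3] + "y"
--     if word.endswith("ses") or word.endswith("xes") or word.endswith("zes"):
--         return word[:-2]
--     if word.endswith("s") and not word.endswith("ss"):
--         return word[:-1]
--     return word
--
-- def _fuzzy_path_equal(a_segs: list[str], b_segs: list[str]) -> bool:
--     """Compare segments with singular/plural tolerance."""
--     if len(a_segs) != len(b_segs):
--         return False
--     for sa, sb in zip(a_segs, b_segs):
--         # If either is a param template, treat as match
--         if sa.startswith("{") or sb.startswith("{"):
--             continue
--         if sa == sb:
--             continue
--         if _singularize(sa) == _singularize(sb):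
--             continue
--         if _levenshtein(sa, sb) <= 1:
--             continue
--         return False
--     return True
-- ===== SOURCE B (Python) =====
-- def _singularize(word: str) -> str:
--     if word.endswith("ies"):
--         return word[:-3] + "y"
--     if word.endswith("ses") or word.endswith("xes") or word.endswith("zes"):
--         return word[:-2]
--     if word.endswith("s") and not word.endswith("ss"):
--         return word[:-1]
--     return word
--
-- def _is_del(longer: str, shorter: str) -> bool:
--     # called with len(longer) == len(shorter) + 1: does deleting one char of longer give shorter?
--     i = 0
--     n = len(shorter)
--     while i < n and longer[i] == shorter[i]:
--         i += 1
--     return longer[i + 1:] == shorter[i:]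
--
-- def _edit_le1(a: str, b: str) -> bool:
--     # edit distance <= 1, decided directly (no DP table)
--     if a == b:
--         return True
--     la, lb = len(a), len(b)
--     if la == lb:
--         return sum(1 for x, y in zip(a, b) if x != y) <= 1
--     if la == lb + 1:
--         return _is_del(a, b)
--     if lb == la + 1:
--         return _is_del(b, a)
--     return False
--
-- def _seg_match(sa: str, sb: str) -> bool:
--     return (sa.startswith("{") or sb.startswith("{")
--             or sa == sb
--             or _singularize(sa) == _singularize(sb)
--             or _edit_le1(sa, sb))
--
-- def _fuzzy_path_equal(a_segs: list[str], b_segs: list[str]) -> bool: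
--     if len(a_segs) != len(b_segs):
--         return False
--     return all(_seg_match(sa, sb) for sa, sb in zip(a_segs, b_segs))
-- ===== Notes on version B (the rewrite author's own statement) =====
-- stated objective: alternative
-- what changed: The full O(n*m) Levenshtein DP per segment pair is replaced by a direct bounded check for edit distance <= 1 (equality, one-substitution mismatch count for equal lengths, one-deletion scan for lengths differing by 1), and the explicit loop with early return becomes all() over zip.
import Mathlib
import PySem

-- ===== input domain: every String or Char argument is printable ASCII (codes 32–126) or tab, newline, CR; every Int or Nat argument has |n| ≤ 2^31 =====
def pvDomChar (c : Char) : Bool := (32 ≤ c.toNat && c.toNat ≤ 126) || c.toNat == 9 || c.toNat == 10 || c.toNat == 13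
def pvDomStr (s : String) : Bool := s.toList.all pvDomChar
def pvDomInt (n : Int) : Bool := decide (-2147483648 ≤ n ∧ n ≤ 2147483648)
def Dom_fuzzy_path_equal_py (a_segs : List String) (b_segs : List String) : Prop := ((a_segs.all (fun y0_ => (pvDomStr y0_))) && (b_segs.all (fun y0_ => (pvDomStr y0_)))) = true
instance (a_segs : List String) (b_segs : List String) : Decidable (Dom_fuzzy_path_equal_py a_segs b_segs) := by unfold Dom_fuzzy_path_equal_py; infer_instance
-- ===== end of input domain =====

-- B replaces the per-pair Levenshtein DP by a direct bounded edit-distance-≤-1 check, and the early-return loop by all() over zip (objective: alternative).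

-- ===== PORT A =====

-- _singularize (identical helper source in both Pythons, shared by both ports); word[:-k] is PySem.List.slice
def pySingularizeL (w : List Char) : List Char :=
  if PySem.Chars.endswith w ['i','e','s'] then PySem.List.slice w none (some (-3)) ++ ['y']
  else if PySem.Chars.endswith w ['s','e','s'] || PySem.Chars.endswith w ['x','e','s']
        || PySem.Chars.endswith w ['z','e','s'] then PySem.List.slice w none (some (-2))
  else if PySem.Chars.endswith w ['s'] && !PySem.Chars.endswith w ['s','s'] then
    PySem.List.slice w none (some (-1))
  else w

-- inner loop of _levenshtein: for j, cb in enumerate(b): curr.append(min(curr[j]+1, prev[j+1]+1, prev[j]+cost))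
-- (curr[j], prev[j], prev[j+1] are always in range, so getD's default is never read)
def pyLevRow (b : List Char) (prev : List Nat) (ca : Char) (i : Nat) : List Nat :=
  (b.zipIdx).foldl
    (fun curr p =>
      curr ++ [min (curr.getD p.2 0 + 1)
                 (min (prev.getD (p.2 + 1) 0 + 1)
                      (prev.getD p.2 0 + (if ca = p.1 then 0 else 1)))])
    [i + 1]

-- _levenshtein; prev[-1] on the always-nonempty row is getLast!
def pyLevChars (a : List Char) (b : List Char) : Nat :=
  if h : a.length < b.length then pyLevChars b a
  else if b = [] then a.length
  else ((a.zipIdx).foldl (fun prev p => pyLevRow b prev p.1 p.2) (List.range (b.length + 1))).getLast!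
termination_by b.length
decreasing_by exact h

-- the for-loop of _fuzzy_path_equal with its continue-chain and early return False
def fuzzyLoopA : List (List Char × List Char) → Bool
  | [] => true
  | (sa, sb) :: rest =>
    if PySem.Chars.startswith sa ['{'] || PySem.Chars.startswith sb ['{'] then fuzzyLoopA rest
    else if sa = sb then fuzzyLoopA rest
    else if pySingularizeL sa = pySingularizeL sb then fuzzyLoopA rest
    else if pyLevChars sa sb ≤ 1 then fuzzyLoopA rest
    else false

def fuzzy_path_equal_py (a_segs : List String) (b_segs : List String) : Bool :=
  if a_segs.length ≠ b_segs.length then false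
  else fuzzyLoopA ((a_segs.map String.toList).zip (b_segs.map String.toList))

-- ===== PORT B =====

-- _is_del: while i < n and longer[i] == shorter[i]: i += 1; return longer[i+1:] == shorter[i:]
-- (longer[i] is always in range when read: i < n < len longer; getD's default is never read)
def isDelFrom (longer : List Char) (shorter : List Char) (i : Nat) : Bool :=
  if h : i < shorter.length ∧ longer.getD i ' ' = shorter.getD i ' ' then
    isDelFrom longer shorter (i + 1)
  else
    longer.drop (i + 1) = shorter.drop i
termination_by shorter.length - i
decreasing_by omega

-- _edit_le1 (edit distance ≤ 1 decided directly); sum(1 for x, y in zip(a, b) if x != y) is the mismatch count, List.countP over the zip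
def editLe1 (u : List Char) (v : List Char) : Bool :=
  if u = v then true
  else if u.length = v.length then ((u.zip v).countP (fun p => p.1 != p.2)) ≤ 1
  else if u.length = v.length + 1 then isDelFrom u v 0
  else if v.length = u.length + 1 then isDelFrom v u 0
  else false

-- _seg_match
def segMatchB (sa : List Char) (sb : List Char) : Bool :=
  PySem.Chars.startswith sa ['{'] || PySem.Chars.startswith sb ['{'] || sa == sb
    || pySingularizeL sa == pySingularizeL sb || editLe1 sa sb

def fuzzy_path_equal_py_alt (a_segs : List String) (b_segs : List String) : Bool :=
  if a_segs.length ≠ b_segs.length then false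
  else ((a_segs.map String.toList).zip (b_segs.map String.toList)).all fun p => segMatchB p.1 p.2

-- ===== PRECONDITION & SPEC =====
def Spec_fuzzy_path_equal_py (a_segs : List String) (b_segs : List String) (out : Bool) : Prop := out = fuzzy_path_equal_py_alt a_segs b_segs
instance (a_segs : List String) (b_segs : List String) (out : Bool) : Decidable (Spec_fuzzy_path_equal_py a_segs b_segs out) := by unfold Spec_fuzzy_path_equal_py; infer_instance

-- ===== CLAIM (what is proved, stated in full; the proofs are below) =====
def Claim_equal_fuzzy_path_equal_py : Prop := ∀ (a_segs : List String) (b_segs : List String), Dom_fuzzy_path_equal_py a_segs b_segs → Spec_fuzzy_path_equal_py a_segs b_segs (fuzzy_path_equal_py a_segs b_segs)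

-- ===== LEMMAS AND PROOFS =====

def E : List Char → List Char → Nat
  | [], v => v.length
  | _ :: u, [] => u.length + 1
  | x :: u, y :: v => if x = y then E u v else 1 + min (E u (y :: v)) (min (E (x :: u) v) (E u v))
termination_by u v => u.length + v.length
decreasing_by all_goals simp only [List.length_cons]; omega

theorem E_nil_right (u : List Char) : E u [] = u.length := by cases u <;> simp [E]

theorem E_symm : ∀ u v : List Char, E u v = E v u := by
  intro u v
  fun_induction E u v with
  | case1 v => rw [E_nil_right]
  | case2 x u => simp [E]
  | case3 u x v ih => simp [E]; exact ih
  | case4 x u y v hne ih1 ih2 ih3 =>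
    have hyx : ¬ y = x := fun hh => hne hh.symm
    simp only [E, if_neg hyx, ih1, ih2, ih3]
    omega

theorem E_zero : ∀ u v : List Char, E u v = 0 ↔ u = v := by
  intro u v
  fun_induction E u v with
  | case1 v => cases v <;> simp [E]
  | case2 x u => simp [E]
  | case3 u x v ih => simp [ih]
  | case4 x u y v hne ih1 ih2 ih3 => simp [hne]

theorem E_low : ∀ u v : List Char, v.length ≤ E u v + u.length ∧ u.length ≤ E u v + v.length := by
  intro u v
  fun_induction E u v with
  | case1 v => simp
  | case2 x u => simp
  | case3 u x v ih => simp only [List.length_cons]; omega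
  | case4 x u y v hne ih1 ih2 ih3 => simp only [List.length_cons] at *; omega

theorem E_both : ∀ (n : Nat) (u v : List Char) (x : Char), u.length + v.length ≤ n →
    E u v ≤ E (x :: u) v + 1 ∧ E (x :: u) v ≤ E u v + 1 := by
  intro n
  induction n with
  | zero =>
    intro u v x h
    have hu : u = [] := by cases u <;> simp_all
    have hv : v = [] := by cases v <;> simp_all
    subst hu; subst hv; simp [E]
  | succ n ih =>
    intro u v x h
    match u with
    | [] =>
      match v with
      | [] => simp [E]
      | y :: v' =>
        have hlow := (E_low [x] v').1
        simp only [List.length_singleton] at hlow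
        by_cases hxy : x = y
        · subst hxy; simp [E] <;> omega
        · simp only [E, if_neg hxy, List.length_nil, List.length_cons]
          omega
    | a :: u' =>
      match v with
      | [] => rw [E_nil_right, E_nil_right]; simp only [List.length_cons]; omega
      | y :: v' =>
        simp only [List.length_cons] at h
        by_cases hxy : x = y
        · by_cases hay : a = y
          · have hP := ih u' v' a (by omega)
            simp only [E, if_pos hxy, if_pos hay]
            omega
          · have hP := (ih u' v' a (by omega)).2
            have hQ : E u' v' ≤ E u' (y :: v') + 1 := by
              have hs := (ih v' u' y (by omega)).1
              calc E u' v' = E v' u' := E_symm _ _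
                _ ≤ E (y :: v') u' + 1 := hs
                _ = E u' (y :: v') + 1 := by rw [E_symm]
            simp only [E, if_pos hxy, if_neg hay]
            omega
        · have hins : E (a :: u') (y :: v') ≤ E (a :: u') v' + 1 := by
            have hs := (ih v' (a :: u') y (by simp only [List.length_cons]; omega)).2
            calc E (a :: u') (y :: v') = E (y :: v') (a :: u') := E_symm _ _
              _ ≤ E v' (a :: u') + 1 := hs
              _ = E (a :: u') v' + 1 := by rw [E_symm]
          have hdel := (ih (a :: u') v' x (by simp only [List.length_cons]; omega)).1
          by_cases hay : a = y
          · simp only [E, if_neg hxy, if_pos hay] at hins ⊢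
            omega
          · simp only [E, if_neg hxy, if_neg hay] at hins ⊢
            omega

theorem E_del (u v : List Char) (x : Char) : E u v ≤ E (x :: u) v + 1 :=
  (E_both (u.length + v.length) u v x le_rfl).1

theorem E_ins (u v : List Char) (y : Char) : E u v ≤ E u (y :: v) + 1 := by
  rw [E_symm u v, E_symm u (y :: v)]
  exact E_del v u y

theorem E_cell (ca cb : Char) (U V : List Char) :
    min (E (ca :: U) V + 1) (min (E U (cb :: V) + 1) (E U V + (if ca = cb then 0 else 1)))
      = E (ca :: U) (cb :: V) := by
  by_cases hc : ca = cb
  · subst hc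
    have h1 := E_del U V ca
    have h2 := E_ins U V ca
    simp only [E, if_pos rfl, if_pos]
    omega
  · simp only [E, if_neg hc]
    omega

theorem getD_append_lt {l l' : List Nat} {j : Nat} (h : j < l.length) (d : Nat) :
    (l ++ l').getD j d = l.getD j d := List.getD_append l l' d j h

theorem getD_append_self {l : List Nat} (v d : Nat) :
    (l ++ [v]).getD l.length d = v := by
  rw [List.getD_append_right _ _ _ _ (Nat.le_refl l.length)]
  simp

theorem take_succ_reverse {b : List Char} {t : Nat} {cb : Char} {rest' : List Char}
    (h : b.drop t = cb :: rest') :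
    (b.take (t + 1)).reverse = cb :: (b.take t).reverse := by
  have hbt : b[t]? = some cb := by
    have h0 : (b.drop t)[0]? = b[t + 0]? := List.getElem?_drop
    rw [h] at h0
    simpa using h0.symm
  rw [List.take_add_one, hbt]
  simp

theorem drop_succ_of_drop_cons {b : List Char} {t : Nat} {cb : Char} {rest' : List Char}
    (h : b.drop t = cb :: rest') : rest' = b.drop (t + 1) := by
  have := congrArg List.tail h
  simpa [List.tail_drop] using this.symm

theorem lt_of_drop_cons {b : List Char} {t : Nat} {cb : Char} {rest' : List Char}
    (h : b.drop t = cb :: rest') : t < b.length := by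
  by_contra hc
  rw [List.drop_eq_nil_of_le (by omega)] at h
  simp at h

theorem row_inner (ca : Char) (U : List Char) (b : List Char) (prev : List Nat)
    (hprev : ∀ j ≤ b.length, prev.getD j 0 = E U ((b.take j).reverse)) :
    ∀ (rest : List Char) (t : Nat) (curr : List Nat),
      rest = b.drop t → t ≤ b.length →
      curr.length = t + 1 →
      (∀ j ≤ t, curr.getD j 0 = E (ca :: U) ((b.take j).reverse)) →
      (((rest.zipIdx t).foldl
          (fun curr p =>
            curr ++ [min (curr.getD p.2 0 + 1)
                       (min (prev.getD (p.2 + 1) 0 + 1)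
                            (prev.getD p.2 0 + (if ca = p.1 then 0 else 1)))]) curr).length = b.length + 1 ∧
      ∀ j ≤ b.length,
        ((rest.zipIdx t).foldl
          (fun curr p =>
            curr ++ [min (curr.getD p.2 0 + 1)
                       (min (prev.getD (p.2 + 1) 0 + 1)
                            (prev.getD p.2 0 + (if ca = p.1 then 0 else 1)))]) curr).getD j 0
          = E (ca :: U) ((b.take j).reverse)) := by
  intro rest
  induction rest with
  | nil =>
    intro t curr hrest hle hlen hcurr
    have ht : t = b.length := by
      have := congrArg List.length hrest
      simp at this
      omega
    subst ht
    exact ⟨by simpa using hlen, fun j hj => by simpa using hcurr j hj⟩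
  | cons cb rest' ih =>
    intro t curr hrest hle hlen hcurr
    have hrest' : rest' = b.drop (t + 1) := drop_succ_of_drop_cons hrest.symm
    have htlt : t < b.length := lt_of_drop_cons hrest.symm
    have htake := take_succ_reverse (rest' := rest') hrest.symm
    rw [List.zipIdx_cons, List.foldl_cons]
    have hval : min (curr.getD t 0 + 1)
        (min (prev.getD (t + 1) 0 + 1)
             (prev.getD t 0 + (if ca = cb then 0 else 1)))
        = E (ca :: U) ((b.take (t + 1)).reverse) := by
      rw [hcurr t le_rfl, hprev (t + 1) (by omega), hprev t (by omega), htake]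
      exact E_cell ca cb U ((b.take t).reverse)
    generalize hv : min (curr.getD t 0 + 1)
        (min (prev.getD (t + 1) 0 + 1)
             (prev.getD t 0 + (if ca = cb then 0 else 1))) = v at hval
    apply ih (t + 1) (curr ++ [v]) hrest' (by omega) (by simp [hlen])
    intro j hj
    rcases Nat.lt_or_ge j (t + 1) with hlt | hge
    · rw [getD_append_lt (by omega)]
      exact hcurr j (by omega)
    · have hj' : j = t + 1 := by omega
      subst hj'
      have hga := getD_append_self (l := curr) v 0
      rw [hlen] at hga
      rw [hga]
      exact hval

theorem pyLevRow_spec (b : List Char) (prev : List Nat) (ca : Char) (i : Nat) (U : List Char)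
    (hU : U.length = i)
    (hprev : ∀ j ≤ b.length, prev.getD j 0 = E U ((b.take j).reverse)) :
    (pyLevRow b prev ca i).length = b.length + 1 ∧
    ∀ j ≤ b.length, (pyLevRow b prev ca i).getD j 0 = E (ca :: U) ((b.take j).reverse) := by
  apply row_inner ca U b prev hprev b 0 [i + 1] (by simp) (by omega) (by simp)
  intro j hj
  have hj0 : j = 0 := by omega
  subst hj0
  simp [E, hU]

theorem outer_inv (a b : List Char) :
    ∀ (rest : List Char) (i : Nat) (prev : List Nat),
      rest = a.drop i → i ≤ a.length →
      prev.length = b.length + 1 →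
      (∀ j ≤ b.length, prev.getD j 0 = E ((a.take i).reverse) ((b.take j).reverse)) →
      ((rest.zipIdx i).foldl (fun prev p => pyLevRow b prev p.1 p.2) prev).length = b.length + 1 ∧
      ∀ j ≤ b.length,
        ((rest.zipIdx i).foldl (fun prev p => pyLevRow b prev p.1 p.2) prev).getD j 0
          = E a.reverse ((b.take j).reverse) := by
  intro rest
  induction rest with
  | nil =>
    intro i prev hrest hle hlen hprev
    have hi : i = a.length := by
      have := congrArg List.length hrest
      simp at this
      omega
    subst hi
    refine ⟨by simpa using hlen, fun j hj => ?_⟩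
    simpa [List.take_length] using hprev j hj
  | cons ca rest' ih =>
    intro i prev hrest hle hlen hprev
    have hrest' : rest' = a.drop (i + 1) := drop_succ_of_drop_cons hrest.symm
    have hilt : i < a.length := lt_of_drop_cons hrest.symm
    have htake := take_succ_reverse (b := a) (t := i) (cb := ca) (rest' := rest') hrest.symm
    rw [List.zipIdx_cons, List.foldl_cons]
    have hU : ((a.take i).reverse).length = i := by
      simp [List.length_take]
      omega
    obtain ⟨hlen2, hval2⟩ := pyLevRow_spec b prev ca i ((a.take i).reverse) hU hprev
    apply ih (i + 1) (pyLevRow b prev ca i) hrest' (by omega) hlen2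
    intro j hj
    rw [hval2 j hj, htake]

theorem getLast!_eq_getD (l : List Nat) (h : l ≠ []) : l.getLast! = l.getD (l.length - 1) 0 := by
  rcases List.exists_cons_of_ne_nil h with ⟨a, t, rfl⟩
  clear h
  induction t generalizing a with
  | nil => rfl
  | cons b t ih => simpa [List.getLast!] using ih b

theorem pyLev_eq_of_ge (a b : List Char) (h : ¬ a.length < b.length) :
    pyLevChars a b = E a.reverse b.reverse := by
  rw [pyLevChars, dif_neg h]
  by_cases hb : b = []
  · rw [if_pos hb]
    subst hb
    simp [E_nil_right]
  · rw [if_neg hb]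
    obtain ⟨hlen, hval⟩ := outer_inv a b a 0 (List.range (b.length + 1)) (by simp) (by omega)
      (by simp) (by
        intro j hj
        rw [List.getD_eq_getElem?_getD, List.getElem?_range (by omega)]
        simp [E]
        omega)
    rw [getLast!_eq_getD _ (by
        intro hc
        rw [hc] at hlen
        simp at hlen)]
    rw [hlen]
    simpa [List.take_length] using hval b.length le_rfl

theorem pyLev_eq (a b : List Char) : pyLevChars a b = E a.reverse b.reverse := by
  by_cases h : a.length < b.length
  · rw [pyLevChars, dif_pos h, pyLev_eq_of_ge b a (by omega), E_symm]
  · exact pyLev_eq_of_ge a b h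

def C1 (u v : List Char) : Prop :=
  ∃ p m1 m2 s : List Char, m1.length ≤ 1 ∧ m2.length ≤ 1 ∧ u = p ++ m1 ++ s ∧ v = p ++ m2 ++ s

theorem C1_rev {u v : List Char} : C1 u v → C1 u.reverse v.reverse := by
  rintro ⟨p, m1, m2, s, h1, h2, rfl, rfl⟩
  exact ⟨s.reverse, m1.reverse, m2.reverse, p.reverse, by simpa using h1, by simpa using h2, by simp, by simp⟩

theorem C1_rev_iff (u v : List Char) : C1 u.reverse v.reverse ↔ C1 u v := by
  constructor
  · intro h
    simpa using C1_rev h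
  · exact C1_rev

theorem len_le_one (l : List Char) (h : l.length ≤ 1) : l = [] ∨ ∃ a, l = [a] := by
  match l with
  | [] => exact Or.inl rfl
  | [a] => exact Or.inr ⟨a, rfl⟩
  | a :: b :: t => simp at h

theorem C1_refl (u : List Char) : C1 u u := ⟨u, [], [], [], by simp, by simp, by simp, by simp⟩

theorem C1_nil_left (v : List Char) : C1 [] v ↔ v.length ≤ 1 := by
  constructor
  · rintro ⟨p, m1, m2, s, h1, h2, h3, rfl⟩
    have hp : p = [] ∧ m1 = [] ∧ s = [] := by
      rcases List.append_eq_nil_iff.mp h3.symm with ⟨h4, h5⟩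
      rcases List.append_eq_nil_iff.mp h4 with ⟨h6, h7⟩
      exact ⟨h6, h7, h5⟩
    rcases hp with ⟨rfl, rfl, rfl⟩
    simpa using h2
  · intro h
    rcases len_le_one v h with rfl | ⟨a, rfl⟩
    · exact C1_refl []
    · exact ⟨[], [], [a], [], by simp, by simp, by simp, by simp⟩

theorem C1_swap {u v : List Char} : C1 u v → C1 v u := by
  rintro ⟨p, m1, m2, s, h1, h2, h3, h4⟩
  exact ⟨p, m2, m1, s, h2, h1, h4, h3⟩

theorem C1_symm {u v : List Char} : C1 u v ↔ C1 v u := ⟨C1_swap, C1_swap⟩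

theorem C1_cons_same (x : Char) (u v : List Char) : C1 (x :: u) (x :: v) ↔ C1 u v := by
  constructor
  · rintro ⟨p, m1, m2, s, h1, h2, h3, h4⟩
    match p with
    | c :: p' =>
      rw [List.cons_append, List.cons_append, List.cons.injEq] at h3 h4
      exact ⟨p', m1, m2, s, h1, h2, h3.2, h4.2⟩
    | [] =>
      rcases len_le_one m1 h1 with rfl | ⟨a, rfl⟩ <;> rcases len_le_one m2 h2 with rfl | ⟨b, rfl⟩
      · -- x::u = s and x::v = s
        simp only [List.nil_append] at h3 h4
        rw [← h4] at h3
        obtain rfl : u = v := by simpa using h3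
        exact C1_refl u
      · -- x::u = s, x::v = b::s
        simp only [List.nil_append] at h3 h4
        rw [← h3, List.singleton_append, List.cons.injEq] at h4
        obtain ⟨rfl, rfl⟩ := h4
        exact ⟨[], [], [x], u, by simp, by simp, by simp, by simp⟩
      · -- x::u = a::s, x::v = s
        simp only [List.nil_append] at h3 h4
        rw [← h4, List.singleton_append, List.cons.injEq] at h3
        obtain ⟨rfl, rfl⟩ := h3
        exact ⟨[], [x], [], v, by simp, by simp, by simp, by simp⟩
      · simp only [List.nil_append, List.singleton_append] at h3 h4
        rw [List.cons.injEq] at h3 h4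
        obtain ⟨rfl, rfl⟩ := h3
        obtain ⟨-, rfl⟩ := h4
        exact C1_refl _
  · rintro ⟨p, m1, m2, s, h1, h2, rfl, rfl⟩
    exact ⟨x :: p, m1, m2, s, h1, h2, by simp, by simp⟩

theorem C1_cons_ne {x y : Char} (hxy : ¬ x = y) (u v : List Char) :
    C1 (x :: u) (y :: v) ↔ u = y :: v ∨ x :: u = v ∨ u = v := by
  constructor
  · rintro ⟨p, m1, m2, s, h1, h2, h3, h4⟩
    match p with
    | c :: p' =>
      rw [List.cons_append, List.cons_append, List.cons.injEq] at h3 h4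
      exact absurd (h3.1.trans h4.1.symm) hxy
    | [] =>
      rcases len_le_one m1 h1 with rfl | ⟨a, rfl⟩ <;> rcases len_le_one m2 h2 with rfl | ⟨b, rfl⟩ <;>
        simp only [List.nil_append] at h3 h4
      · rw [← h4] at h3
        exact absurd (by simpa using h3 : _ ∧ _).1 hxy
      · rw [← h3, List.singleton_append, List.cons.injEq] at h4
        exact Or.inr (Or.inl h4.2.symm)
      · rw [← h4, List.singleton_append, List.cons.injEq] at h3
        exact Or.inl h3.2
      · simp only [List.singleton_append] at h3 h4
        rw [List.cons.injEq] at h3 h4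
        obtain rfl := h3.2
        obtain rfl := h4.2
        exact Or.inr (Or.inr rfl)
  · rintro (rfl | h | rfl)
    · exact ⟨[], [x], [], y :: v, by simp, by simp, by simp, by simp⟩
    · exact ⟨[], [], [y], x :: u, by simp, by simp, by simp, by simp [h]⟩
    · exact ⟨[], [x], [y], u, by simp, by simp, by simp, by simp⟩

theorem E_cons_ne_le1 {x y : Char} (hxy : ¬ x = y) (u v : List Char) :
    E (x :: u) (y :: v) ≤ 1 ↔ u = y :: v ∨ x :: u = v ∨ u = v := by
  rw [show E (x :: u) (y :: v) = 1 + min (E u (y :: v)) (min (E (x :: u) v) (E u v)) from by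
    simp only [E, if_neg hxy]]
  constructor
  · intro h
    have h0 : E u (y :: v) = 0 ∨ E (x :: u) v = 0 ∨ E u v = 0 := by omega
    rcases h0 with h0 | h0 | h0
    · exact Or.inl ((E_zero _ _).mp h0)
    · exact Or.inr (Or.inl ((E_zero _ _).mp h0))
    · exact Or.inr (Or.inr ((E_zero _ _).mp h0))
  · rintro (rfl | rfl | rfl)
    · have h0 : E (y :: v) (y :: v) = 0 := (E_zero _ _).mpr rfl
      omega
    · have h0 : E (x :: u) (x :: u) = 0 := (E_zero _ _).mpr rfl
      omega
    · have h0 : E u u = 0 := (E_zero _ _).mpr rfl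
      omega

theorem E_le1_iff_C1 : ∀ u v : List Char, E u v ≤ 1 ↔ C1 u v := by
  intro u v
  fun_induction E u v with
  | case1 v => exact (C1_nil_left v).symm
  | case2 x u =>
    rw [C1_symm, C1_nil_left]
    simp
  | case3 u x v ih => rw [C1_cons_same]; exact ih
  | case4 x u y v hne ih1 ih2 ih3 =>
    rw [show 1 + min (E u (y :: v)) (min (E (x :: u) v) (E u v)) = E (x :: u) (y :: v) from by
      simp only [E, if_neg hne]]
    rw [E_cons_ne_le1 hne, C1_cons_ne hne]

theorem isDelFrom_succ (x y : Char) (l s : List Char) : ∀ (i : Nat),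
    isDelFrom (x :: l) (y :: s) (i + 1) = isDelFrom l s i := by
  intro i
  fun_induction isDelFrom l s i with
  | case1 i h ih =>
    rw [isDelFrom.eq_def (x :: l) (y :: s) (i + 1)]
    rw [dif_pos (by simpa using h)]
    exact ih
  | case2 i h =>
    rw [isDelFrom.eq_def (x :: l) (y :: s) (i + 1)]
    rw [dif_neg (by simpa using h)]
    simp [List.drop_succ_cons]

theorem zip_count_zero : ∀ u v : List Char, u.length = v.length →
    (((u.zip v).countP (fun p => p.1 != p.2)) = 0 ↔ u = v) := by
  intro u
  induction u with
  | nil =>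
    intro v h
    have : v = [] := by cases v <;> simp_all
    subst this
    simp
  | cons x u' ih =>
    intro v h
    match v with
    | [] => simp at h
    | y :: v' =>
      simp only [List.length_cons, Nat.add_right_cancel_iff] at h
      by_cases hxy : x = y
      · subst hxy
        simp [List.countP_cons, ih v' h]
      · simp [List.countP_cons, hxy]

theorem editLe1_cons_same (x : Char) (u v : List Char) : editLe1 (x :: u) (x :: v) = editLe1 u v := by
  by_cases h1 : u = v
  · subst h1; simp [editLe1]
  · have hne : ¬ (x :: u = x :: v) := by simp [h1]
    by_cases h2 : u.length = v.length
    · simp [editLe1, h1, hne, h2, List.countP_cons]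
    · by_cases h3 : u.length = v.length + 1
      · have hdel : isDelFrom (x :: u) (x :: v) 0 = isDelFrom u v 0 := by
          rw [isDelFrom.eq_def, dif_pos (by simp)]
          exact isDelFrom_succ x x u v 0
        simp [editLe1, h1, hne, h2, h3, hdel]
      · by_cases h4 : v.length = u.length + 1
        · have hdel : isDelFrom (x :: v) (x :: u) 0 = isDelFrom v u 0 := by
            rw [isDelFrom.eq_def, dif_pos (by simp)]
            exact isDelFrom_succ x x v u 0
          simp only [editLe1, h1, hne, h2, h3, h4, hdel]
          simp [h1, h2, h3, h4, hdel]
          exact fun hc => absurd hc (by omega)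
        · simp [editLe1, h1, hne, h2, h3, h4]

theorem editLe1_iff : ∀ u v : List Char, editLe1 u v = true ↔ E u v ≤ 1 := by
  intro u
  induction u with
  | nil =>
    intro v
    match v with
    | [] => simp [editLe1, E]
    | y :: v' =>
      by_cases hv : v' = []
      · subst hv
        simp [editLe1, isDelFrom.eq_def, E]
      · have hpos : 0 < v'.length := List.length_pos_iff.mpr hv
        have h1 : ¬ ([] : List Char) = y :: v' := by simp
        have h2 : ¬ ([] : List Char).length = (y :: v').length := by simp
        have h3 : ¬ ([] : List Char).length = (y :: v').length + 1 := by simp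
        have h4 : ¬ (y :: v').length = ([] : List Char).length + 1 := by simp [hv]
        simp only [editLe1, if_neg h1, if_neg h2, if_neg h3, if_neg h4, E]
        simp [hpos]
        omega
  | cons x u' ih =>
    intro v
    match v with
    | [] =>
      by_cases hu : u' = []
      · subst hu
        simp [editLe1, isDelFrom.eq_def, E]
      · have hpos : 0 < u'.length := List.length_pos_iff.mpr hu
        have h1 : ¬ (x :: u') = ([] : List Char) := by simp
        have h2 : ¬ (x :: u').length = ([] : List Char).length := by simp
        have h3 : ¬ (x :: u').length = ([] : List Char).length + 1 := by simp [hu]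
        have h4 : ¬ ([] : List Char).length = (x :: u').length + 1 := by simp
        simp only [editLe1, if_neg h1, if_neg h2, if_neg h3, if_neg h4, E]
        simp [hpos]
        omega
    | y :: v' =>
      by_cases hxy : x = y
      · subst hxy
        rw [editLe1_cons_same, show E (x :: u') (x :: v') = E u' v' from by simp [E]]
        exact ih v'
      · rw [E_cons_ne_le1 hxy]
        have hne : ¬ (x :: u') = y :: v' := by simp [hxy]
        by_cases h2 : u'.length = v'.length
        · have hd1 : ¬ u' = y :: v' := by intro hc; subst hc; simp at h2
          have hd2 : ¬ x :: u' = v' := by intro hc; rw [← hc] at h2; simp at h2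
          have hcnt := zip_count_zero u' v' h2
          simp only [editLe1, if_neg hne, List.length_cons, Nat.add_right_cancel_iff, if_pos h2,
            List.zip_cons_cons, List.countP_cons, hd1, hd2, false_or]
          simp [hxy, hcnt]
        · by_cases h3 : u'.length = v'.length + 1
          · have hd2 : ¬ x :: u' = v' := by intro hc; rw [← hc] at h3; simp at h3; omega
            have hd3 : ¬ u' = v' := by intro hc; rw [hc] at h3; omega
            have hdel : isDelFrom (x :: u') (y :: v') 0 = decide (u' = y :: v') := by
              rw [isDelFrom.eq_def, dif_neg (by simp [hxy])]
              simp
            simp only [editLe1, if_neg hne, List.length_cons, Nat.add_right_cancel_iff,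
              if_neg h2, if_pos h3, hdel, hd2, hd3, or_false, false_or]
            simp
          · by_cases h4 : v'.length = u'.length + 1
            · have hd1 : ¬ u' = y :: v' := by intro hc; rw [hc] at h4; simp at h4; omega
              have hd3 : ¬ u' = v' := by intro hc; rw [hc] at h4; omega
              have hdel : isDelFrom (y :: v') (x :: u') 0 = decide (v' = x :: u') := by
                rw [isDelFrom.eq_def, dif_neg (by simp; intro hc; exact absurd hc.symm hxy)]
                simp
              simp only [editLe1, if_neg hne, List.length_cons, Nat.add_right_cancel_iff,
                if_neg h2, if_neg h3, if_pos h4, hdel, hd1, hd3, or_false, false_or]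
              constructor
              · intro h
                exact (of_decide_eq_true h).symm
              · intro h
                exact decide_eq_true h.symm
            · have hd1 : ¬ u' = y :: v' := by intro hc; rw [hc] at h3; simp at h3
              have hd2 : ¬ x :: u' = v' := by intro hc; rw [← hc] at h4; simp at h4
              have hd3 : ¬ u' = v' := by intro hc; rw [hc] at h2; omega
              simp [editLe1, hne, h2, h3, h4, hd1, hd2, hd3]

theorem pyLev_le1_iff (u v : List Char) : (pyLevChars u v ≤ 1) ↔ editLe1 u v = true := by
  rw [pyLev_eq, editLe1_iff, E_le1_iff_C1, E_le1_iff_C1, C1_rev_iff]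

theorem loopA_eq_all : ∀ l : List (List Char × List Char),
    fuzzyLoopA l = l.all fun p => segMatchB p.1 p.2 := by
  intro l
  induction l with
  | nil => rfl
  | cons hd tl ih =>
    obtain ⟨sa, sb⟩ := hd
    rw [List.all_cons, ← ih]
    by_cases h1 : (PySem.Chars.startswith sa ['{'] || PySem.Chars.startswith sb ['{']) = true
    · simp [fuzzyLoopA, segMatchB, h1]
    · by_cases h2 : sa = sb
      · simp [fuzzyLoopA, segMatchB, h1, h2]
      · by_cases h3 : pySingularizeL sa = pySingularizeL sb
        · simp [fuzzyLoopA, segMatchB, h1, h2, h3]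
        · by_cases h4 : pyLevChars sa sb ≤ 1
          · have h5 := (pyLev_le1_iff sa sb).mp h4
            simp [fuzzyLoopA, segMatchB, h1, h2, h3, h4, h5]
          · have h5 : editLe1 sa sb = false := by
              rw [← Bool.not_eq_true]
              exact fun hc => h4 ((pyLev_le1_iff sa sb).mpr hc)
            simp [fuzzyLoopA, segMatchB, h1, h2, h3, h4, h5]

-- ===== VERDICT (by name: the statement is the Claim_ definition above) =====
theorem fuzzy_path_equal_py_spec : Claim_equal_fuzzy_path_equal_py := by
  intro a_segs b_segs _hdom
  unfold Spec_fuzzy_path_equal_py fuzzy_path_equal_py fuzzy_path_equal_py_alt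
  split
  · rfl
  · exact loopA_eq_all _
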